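-- pv_equiv track=rewrite | github.com/rubenxrodriguez/Summer25Projects | U18_Python/Scraper/sports_ref_scrape* 0710.py | extract_season_team_and_stats
-- ===== SOURCE A (Python) =====
-- def extract_season_team_and_stats(best_season_str, team_names):
--     # Split the string into parts
--     parts = best_season_str.split()
--
--     # First part is always the season
--     season = parts[0]
--     remaining_str = ' '.join(parts[1:])
--
--     # Sort team names by length (longest first) to handle multi-word names
--     sorted_teams = sorted(team_names, key=lambda x: -len(x.split()))
--
--     for team in sorted_teams:
--         if remaining_str.startswith(team):
--             # Found the team name - what follows is the stats
--             stats_str = remaining_str[len(team):].strip()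
--             return season, team, stats_str.split()
--
--     # Fallback if no team found (shouldn't happen if team_names is complete)
--     return season, None, parts[1:]
-- ===== SOURCE B (Python) =====
-- def extract_season_team_and_stats(best_season_str, team_names):
--     parts = best_season_str.split()
--     season = parts[0]
--     remaining_str = ' '.join(parts[1:])
--     # Single pass: keep the matching team with the most words;
--     # strict '>' keeps the earliest on ties, matching A's stable sort.
--     best_team = None
--     best_count = -1
--     for team in team_names:
--         if remaining_str.startswith(team):
--             c = len(team.split())
--             if c > best_count:
--                 best_team, best_count = team, c
--     if best_team is None:
--         return season, None, parts[1:]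
--     return season, best_team, remaining_str[len(best_team):].strip().split()
-- ===== Notes on version B (the rewrite author's own statement) =====
-- stated objective: simpler
-- what changed: Replaces the sort-by-word-count-then-first-match scan with a single pass over team_names that tracks the matching team with the most words (strict '>' reproduces the stable sort's tie-break).
import Mathlib
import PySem

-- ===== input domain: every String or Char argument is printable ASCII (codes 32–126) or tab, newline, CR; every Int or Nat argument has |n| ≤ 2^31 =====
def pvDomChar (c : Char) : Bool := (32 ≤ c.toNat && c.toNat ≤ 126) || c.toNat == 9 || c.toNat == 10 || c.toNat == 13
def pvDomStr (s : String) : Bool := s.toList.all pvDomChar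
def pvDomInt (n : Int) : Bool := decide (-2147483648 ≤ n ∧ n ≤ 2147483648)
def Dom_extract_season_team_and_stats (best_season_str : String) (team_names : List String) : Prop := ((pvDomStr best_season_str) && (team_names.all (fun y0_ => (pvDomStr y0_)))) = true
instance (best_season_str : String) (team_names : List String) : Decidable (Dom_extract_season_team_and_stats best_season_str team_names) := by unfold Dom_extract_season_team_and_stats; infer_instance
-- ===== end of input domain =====

-- B replaces A's sort-by-word-count-then-first-match with a single max-tracking pass (simpler, one scan).

-- ===== PORT A =====
-- A's sort key: lambda x: -len(x.split())
def pvKeyA (x : String) : Int := -(((PySem.Str.split₀ x).length : Int))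

-- A's loop 'for team in sorted_teams: ...' with its two exits
def pvScanA (season remaining : String) (rest : List String) : List String → String × Option String × List String
  | [] => (season, none, rest)
  | t :: ts =>
    if PySem.Str.startswith remaining t then
      (season, some t, PySem.Str.split₀ (PySem.Str.strip (PySem.Str.slice remaining (some ((PySem.Str.len t : Int))) none)))
    else pvScanA season remaining rest ts

def extract_season_team_and_stats (best_season_str : String) (team_names : List String) : String × Option String × List String :=
  match PySem.Str.split₀ best_season_str with
  | [] => ("", none, [])  -- Python raises IndexError on parts[0] here; excluded by Pre_
  | season :: rest =>
    let remaining := PySem.Str.join " " rest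
    pvScanA season remaining rest (PySem.List.sorted team_names pvKeyA)

-- ===== PORT B =====
-- B's loop body: update (best_team, best_count) when team matches and has strictly more words
def pvBStep (remaining : String) (bc : Option String × Int) (team : String) : Option String × Int :=
  if PySem.Str.startswith remaining team then
    if (((PySem.Str.split₀ team).length : Int)) > bc.2 then (some team, ((PySem.Str.split₀ team).length : Int)) else bc
  else bc

def extract_season_team_and_stats_alt (best_season_str : String) (team_names : List String) : String × Option String × List String :=
  match PySem.Str.split₀ best_season_str with
  | [] => ("", none, [])  -- Python raises IndexError on parts[0] here; excluded by Pre_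
  | season :: rest =>
    let remaining := PySem.Str.join " " rest
    match (team_names.foldl (pvBStep remaining) (none, -1)).1 with
    | none => (season, none, rest)
    | some t => (season, some t, PySem.Str.split₀ (PySem.Str.strip (PySem.Str.slice remaining (some ((PySem.Str.len t : Int))) none)))

-- ===== PRECONDITION & SPEC =====
-- Pre_ excludes exactly the inputs where best_season_str has no words: there Python's parts[0] raises IndexError (both A and B raise).
def Pre_extract_season_team_and_stats (best_season_str : String) (team_names : List String) : Prop :=
  PySem.Str.split₀ best_season_str ≠ []
instance (best_season_str : String) (team_names : List String) : Decidable (Pre_extract_season_team_and_stats best_season_str team_names) := by unfold Pre_extract_season_team_and_stats; infer_instance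

def pvWitness_extract_season_team_and_stats : String × List String := ("2020 New York 12 34", ["New", "New York"])

def Spec_extract_season_team_and_stats (best_season_str : String) (team_names : List String) (out : String × Option String × List String) : Prop := out = extract_season_team_and_stats_alt best_season_str team_names
instance (best_season_str : String) (team_names : List String) (out : String × Option String × List String) : Decidable (Spec_extract_season_team_and_stats best_season_str team_names out) := by unfold Spec_extract_season_team_and_stats; infer_instance

-- ===== CLAIM (what is proved, stated in full; the proofs are below) =====
def Claim_equal_extract_season_team_and_stats : Prop := ∀ (best_season_str : String) (team_names : List String), Dom_extract_season_team_and_stats best_season_str team_names → Pre_extract_season_team_and_stats best_season_str team_names → Spec_extract_season_team_and_stats best_season_str team_names (extract_season_team_and_stats best_season_str team_names)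

-- ===== LEMMAS AND PROOFS =====

-- word count of a team name, as the Int that B's best_count stores
def pvWc (t : String) : Int := ((PySem.Str.split₀ t).length : Int)

-- best_count as a function of the current best_team (-1 before any match, word count after)
def pvCval : Option String → Int
  | none => -1
  | some t => pvWc t

theorem pvWc_nonneg (t : String) : 0 ≤ pvWc t := Int.natCast_nonneg _

theorem pvKeyA_eq (x : String) : pvKeyA x = -pvWc x := rfl

-- inserting a non-matching element does not change the first match
theorem pv_find_insertBy_neg (P : String → Bool) (bef : String → String → Bool) (x : String)
    (hx : P x = false) :
    ∀ s : List String, List.find? P (PySem.List.insertBy bef x s) = List.find? P s := by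
  intro s
  induction s with
  | nil => simp [PySem.List.insertBy, List.find?, hx]
  | cons y ys ih =>
    simp only [PySem.List.insertBy]
    by_cases h : bef x y = true
    · simp [h, hx]
    · simp only [h, if_false]
      by_cases hy : P y = true
      · simp [List.find?, hy]
      · simp only [Bool.not_eq_true] at hy
        simp [List.find?, hy, ih]

-- inserting a matching element into a key-sorted list: it becomes the first match iff its
-- word count strictly beats the current first match's
theorem pv_find_insertBy_pos (P : String → Bool) (x : String) (hx : P x = true) :
    ∀ s : List String, s.Pairwise (fun a b => pvKeyA a ≤ pvKeyA b) →
    List.find? P (PySem.List.insertBy (fun a b => decide (pvKeyA a < pvKeyA b)) x s) =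
      (if pvCval (List.find? P s) < pvWc x then some x else List.find? P s) := by
  intro s
  induction s with
  | nil =>
    intro _
    have h0 := pvWc_nonneg x
    simp only [PySem.List.insertBy, List.find?_nil, List.find?_cons, hx, pvCval]
    rw [if_pos (by omega)]
  | cons y ys ih =>
    intro hp
    have hp' := (List.pairwise_cons.mp hp).2
    have hhead := (List.pairwise_cons.mp hp).1
    simp only [PySem.List.insertBy]
    by_cases h : decide (pvKeyA x < pvKeyA y) = true
    · -- x inserted at the front: wc y < wc x
      have hlt : pvWc y < pvWc x := by
        simp only [decide_eq_true_eq, pvKeyA_eq] at h; omega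
      have hcval : pvCval (List.find? P (y :: ys)) < pvWc x := by
        by_cases hy : P y = true
        · simp [List.find?, hy, pvCval, hlt]
        · simp only [Bool.not_eq_true] at hy
          simp only [List.find?_cons, hy]
          cases hfind : List.find? P ys with
          | none =>
            have := pvWc_nonneg x
            simp [pvCval]; omega
          | some u =>
            have hu : u ∈ ys := List.mem_of_find?_eq_some hfind
            have := hhead u hu
            simp only [pvKeyA_eq] at this
            simp [pvCval]; omega
      rw [if_pos hcval]
      simp [h, hx]
    · -- x inserted further right: wc x ≤ wc y
      have hle : pvWc x ≤ pvWc y := by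
        simp only [decide_eq_true_eq, pvKeyA_eq, not_lt] at h
        omega
      simp only [h, if_false]
      by_cases hy : P y = true
      · have hno : ¬ pvCval (List.find? P (y :: ys)) < pvWc x := by
          simp [List.find?, hy, pvCval]; omega
        rw [if_neg hno]
        simp [List.find?, hy]
      · simp only [Bool.not_eq_true] at hy
        simp only [List.find?_cons, hy, Bool.false_eq_true, if_false]
        exact ih hp'

-- B's fold computes the first match of A's sorted scan together with its word count
theorem pv_foldB_eq (remaining : String) (xs : List String) :
    xs.foldl (pvBStep remaining) (none, -1) =
      ((PySem.List.sorted xs pvKeyA).find? (fun t => PySem.Str.startswith remaining t),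
       pvCval ((PySem.List.sorted xs pvKeyA).find? (fun t => PySem.Str.startswith remaining t))) := by
  induction xs using List.reverseRecOn with
  | nil => simp [PySem.List.sorted, pvCval]
  | append_singleton xs x ih =>
    have hsorted : PySem.List.sorted (xs ++ [x]) pvKeyA =
        PySem.List.insertBy (fun a b => decide (pvKeyA a < pvKeyA b)) x (PySem.List.sorted xs pvKeyA) := by
      rw [PySem.List.sorted_eq_foldl_insertBy, List.foldl_append, ← PySem.List.sorted_eq_foldl_insertBy]
      simp [List.foldl]
    rw [List.foldl_append, ih, hsorted]
    simp only [List.foldl]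
    unfold pvBStep
    by_cases hx : PySem.Str.startswith remaining x = true
    · rw [if_pos hx,
        pv_find_insertBy_pos (fun t => PySem.Str.startswith remaining t) x hx _
          (PySem.List.sorted_pairwise xs pvKeyA),
        show ((PySem.Str.split₀ x).length : Int) = pvWc x from rfl]
      by_cases hc : pvCval ((PySem.List.sorted xs pvKeyA).find?
          (fun t => PySem.Str.startswith remaining t)) < pvWc x
      · rw [if_pos hc, if_pos hc]
        rfl
      · rw [if_neg hc, if_neg hc]
    · rw [if_neg hx]
      rw [pv_find_insertBy_neg (fun t => PySem.Str.startswith remaining t) _ x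
          (by simpa using hx) (PySem.List.sorted xs pvKeyA)]

-- A's loop is the first-match search over its list
theorem pv_scanA_eq_find (season remaining : String) (rest : List String) :
    ∀ ts : List String, pvScanA season remaining rest ts =
      (match List.find? (fun t => PySem.Str.startswith remaining t) ts with
       | none => (season, none, rest)
       | some t => (season, some t,
           PySem.Str.split₀ (PySem.Str.strip (PySem.Str.slice remaining (some ((PySem.Str.len t : Int))) none)))) := by
  intro ts
  induction ts with
  | nil => simp [pvScanA, List.find?]
  | cons t ts ih =>
    by_cases h : PySem.Str.startswith remaining t = true
    · unfold pvScanA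
      rw [if_pos h, List.find?_cons_of_pos h]
    · unfold pvScanA
      rw [if_neg h, List.find?_cons_of_neg (by simpa using h), ih]

-- ===== VERDICT (by name: the statement is the Claim_ definition above) =====
theorem extract_season_team_and_stats_spec : Claim_equal_extract_season_team_and_stats := by
  intro best_season_str team_names _hdom hpre
  unfold Spec_extract_season_team_and_stats
  unfold extract_season_team_and_stats extract_season_team_and_stats_alt
  cases hsplit : PySem.Str.split₀ best_season_str with
  | nil => exact absurd hsplit hpre
  | cons season rest =>
    simp only [pv_scanA_eq_find, pv_foldB_eq]
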